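-- pv_equiv track=rewrite | github.com/takechi-scratch/atcoder | arc/arc215/a/main.py | solve
-- ===== SOURCE A (Python) =====
-- def solve(N: int, K: int, L: int, A: list[int]):
--     A.sort()
--     dists = [A[i + 1] - A[i] for i in range(N - 1)]
--     dists.sort(reverse=True)
--     left = A[0]
--     right = L - A[-1]
--
--     now_ans = 0
--     best_ans = max(left, right) + (left + right) * (K - 1)
--     for d in dists:
--         now_score = d // 2
--         if K <= 0:
--             break
--
--         now_ans += now_score
--         K -= 1
--         left += now_score
--         right += now_score
--         best_ans = max(best_ans, now_ans + max(left, right) + (left + right) * (K - 1))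
--
--     return max(best_ans, now_ans)
-- ===== SOURCE B (Python) =====
-- def solve(N: int, K: int, L: int, A: list[int]):
--     # Candidate score after taking the i largest gap-halves is
--     #   g(i) = max(a,b) + (a+b)*(K-i-1) + 2*P_i*(K-i),
--     # and g is CONCAVE in i (the halves are sorted descending and nonnegative),
--     # so the scan can stop at the first non-improving step instead of
--     # evaluating every candidate; the final answer is max(g(i*), P_m).
--     A.sort()
--     halves = [(A[i + 1] - A[i]) // 2 for i in range(N - 1)]
--     halves.sort(reverse=True)
--     m = max(0, min(K, N - 1))
--     halves = halves[:m]
--     a = A[0]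
--     b = L - A[-1]
--     c = a + b
--     i = 0
--     p = 0
--     for h in halves:
--         if 2 * (h * (K - i - 1) - p) <= c:
--             break
--         p += h
--         i += 1
--     best = max(a, b) + c * (K - i - 1) + 2 * p * (K - i)
--     return max(best, p + sum(halves[i:]))
-- ===== Notes on version B (the rewrite author's own statement) =====
-- stated objective: alternative
-- what changed: B exploits that the candidate score g(i)=max(a,b)+(a+b)(K-i-1)+2*P_i*(K-i) is concave in the number i of gaps taken (halves sorted descending, nonnegative), so instead of A's full greedy sweep evaluating a candidate after every taken gap it stops at the first non-improving step and returns max(g(i*), P_m).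
import Mathlib
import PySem

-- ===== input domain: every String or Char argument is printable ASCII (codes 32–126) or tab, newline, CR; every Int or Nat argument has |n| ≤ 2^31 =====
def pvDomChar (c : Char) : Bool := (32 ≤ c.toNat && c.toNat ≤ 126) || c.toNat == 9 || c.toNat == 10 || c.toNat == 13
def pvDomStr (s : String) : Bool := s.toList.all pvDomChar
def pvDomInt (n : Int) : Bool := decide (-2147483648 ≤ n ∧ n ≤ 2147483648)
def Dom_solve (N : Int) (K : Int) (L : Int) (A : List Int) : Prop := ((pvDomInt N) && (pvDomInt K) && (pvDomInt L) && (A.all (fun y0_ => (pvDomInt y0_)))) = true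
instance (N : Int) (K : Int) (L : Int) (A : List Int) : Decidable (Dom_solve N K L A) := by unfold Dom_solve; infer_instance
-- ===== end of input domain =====

-- B replaces A's full greedy sweep (which evaluates a candidate after every taken
-- gap) by an early-stopping scan: the candidate score is concave in the number of
-- gaps taken, so B stops at the first non-improving step. Both A and B sort the
-- list argument in place; the equivalence proved here is about the return value
-- (the mutation is identical).

-- ===== PORT A =====
-- the for-loop of A, state = (K, left, right, now_ans, best_ans); break when K ≤ 0
def solveLoop : List Int → Int → Int → Int → Int → Int → Int
  | [], _K, _left, _right, now_ans, best_ans => max best_ans now_ans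
  | d :: ds, K, left, right, now_ans, best_ans =>
    let now_score := PySem.Int.floordiv d 2
    if K ≤ 0 then max best_ans now_ans
    else
      solveLoop ds (K - 1) (left + now_score) (right + now_score) (now_ans + now_score)
        (max best_ans ((now_ans + now_score) + max (left + now_score) (right + now_score)
          + ((left + now_score) + (right + now_score)) * ((K - 1) - 1)))

def solve (N : Int) (K : Int) (L : Int) (A : List Int) : Int :=
  let As := PySem.List.sorted A (fun x => x) false
  let dists := (PySem.List.pyRange 0 (N - 1) 1).map
    (fun i => PySem.List.pyGetD As (i + 1) 0 - PySem.List.pyGetD As i 0)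
  let dists := PySem.List.sorted dists (fun x => x) true
  let left := PySem.List.pyGetD As 0 0
  let right := L - PySem.List.pyGetD As (-1) 0
  let best_ans := max left right + (left + right) * (K - 1)
  solveLoop dists K left right 0 best_ans

-- ===== PORT B =====
-- B's while loop: consume the (sliced) halves while the step improves the score;
-- state = (index i, prefix sum p); returns (i, p, unconsumed suffix = halves[i:])
def scanB : List Int → Int → Int → Int → Int → Int × Int × List Int
  | [], _c, _K, i, p => (i, p, [])
  | h :: t, c, K, i, p =>
    if 2 * (h * (K - i - 1) - p) ≤ c then (i, p, h :: t)
    else scanB t c K (i + 1) (p + h)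

def solve_alt (N : Int) (K : Int) (L : Int) (A : List Int) : Int :=
  let As := PySem.List.sorted A (fun x => x) false
  let halves := PySem.List.sorted ((PySem.List.pyRange 0 (N - 1) 1).map
    (fun i => PySem.Int.floordiv (PySem.List.pyGetD As (i + 1) 0 - PySem.List.pyGetD As i 0) 2))
    (fun x => x) true
  let m : Int := max 0 (min K (N - 1))
  let hs := PySem.List.slice halves none (some m)
  let a := PySem.List.pyGetD As 0 0
  let b := L - PySem.List.pyGetD As (-1) 0
  let c := a + b
  let r := scanB hs c K 0 0
  let best := max a b + c * (K - r.1 - 1) + 2 * r.2.1 * (K - r.1)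
  max best (r.2.1 + r.2.2.sum)

-- ===== PRECONDITION & SPEC =====
-- Pre_ excludes exactly the inputs where Python A raises (IndexError on A[0]
-- of an empty list, or A[i+1] out of range when N exceeds len(A)).
def Pre_solve (N : Int) (K : Int) (L : Int) (A : List Int) : Prop :=
  A ≠ [] ∧ N ≤ (A.length : Int)
instance (N : Int) (K : Int) (L : Int) (A : List Int) : Decidable (Pre_solve N K L A) := by
  unfold Pre_solve; infer_instance
def pvWitness_solve : Int × Int × Int × List Int := (3, 2, 10, [1, 4, 8])
def Spec_solve (N : Int) (K : Int) (L : Int) (A : List Int) (out : Int) : Prop := out = solve_alt N K L A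
instance (N : Int) (K : Int) (L : Int) (A : List Int) (out : Int) : Decidable (Spec_solve N K L A out) := by unfold Spec_solve; infer_instance

-- ===== CLAIM (what is proved, stated in full; the proofs are below) =====
def Claim_equal_solve : Prop := ∀ (N : Int) (K : Int) (L : Int) (A : List Int), Dom_solve N K L A → Pre_solve N K L A → Spec_solve N K L A (solve N K L A)

-- ===== LEMMAS AND PROOFS =====

-- prefix sum of the halves of the first i gaps
def psumAt (gs : List Int) (i : Nat) : Int :=
  ((gs.take i).map (fun g => PySem.Int.floordiv g 2)).sum

-- candidate score after taking j gaps, with prefix-half-sum p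
def cand (K a b now p j : Int) : Int :=
  now + 2 * p + max a b + (a + b + 2 * p) * (K - j - 1)

-- candidate score as a function of the number j of gaps taken
def GG (gs : List Int) (a b K : Int) (j : Nat) : Int :=
  max a b + (a + b) * (K - j - 1) + 2 * psumAt gs j * (K - j)

-- the improvement test B's loop makes at index j (loop continues iff c < DD j)
def DD (gs : List Int) (K : Int) (j : Nat) : Int :=
  2 * (PySem.Int.floordiv (gs.getD j 0) 2 * (K - j - 1) - psumAt gs j)

-- number of gaps A's loop actually takes
def mN (K : Int) (len : Nat) : Nat := min K.toNat len

theorem psumAt_succ (gs : List Int) (j : Nat) (h : j < gs.length) :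
    psumAt gs (j + 1) = psumAt gs j + PySem.Int.floordiv gs[j] 2 := by
  have ht : gs.take (j + 1) = gs.take j ++ [gs[j]] := by
    rw [List.take_succ, List.getElem?_eq_getElem h]
    rfl
  rw [psumAt, psumAt, ht, List.map_append, List.sum_append]
  simp

theorem foldl_max_init (f : Nat → Int) (l : List Nat) (x y : Int) :
    l.foldl (fun acc i => max acc (f i)) (max x y)
      = max y (l.foldl (fun acc i => max acc (f i)) x) := by
  induction l generalizing x with
  | nil => simp [max_comm]
  | cons i t ih =>
    simp only [List.foldl_cons]
    rw [show max (max x y) (f i) = max (max x (f i)) y by rw [max_right_comm], ih]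

theorem foldl_max_ext (f g : Nat → Int) (l : List Nat) (x y : Int)
    (hfg : ∀ i ∈ l, f i = g i) (hxy : x = y) :
    l.foldl (fun acc i => max acc (f i)) x = l.foldl (fun acc i => max acc (g i)) y := by
  induction l generalizing x y with
  | nil => simpa using hxy
  | cons i t ih =>
    simp only [List.foldl_cons]
    exact ih (max x (f i)) (max y (g i)) (fun j hj => hfg j (List.mem_cons_of_mem _ hj))
      (by rw [hxy, hfg i List.mem_cons_self])

theorem foldl_max_ge_init (g : Nat → Int) (l : List Nat) (x : Int) :
    x ≤ l.foldl (fun acc j => max acc (g j)) x := by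
  induction l generalizing x with
  | nil => simp
  | cons i t ih => exact le_trans (le_max_left x (g i)) (ih _)

theorem foldl_max_ge_mem (g : Nat → Int) :
    ∀ (l : List Nat) (x : Int) (j : Nat), j ∈ l → g j ≤ l.foldl (fun acc j => max acc (g j)) x := by
  intro l
  induction l with
  | nil => intro x j hj; cases hj
  | cons i t ih =>
    intro x j hj
    rcases List.mem_cons.mp hj with rfl | hj'
    · exact le_trans (le_max_right x (g j)) (foldl_max_ge_init g t _)
    · exact ih _ j hj'

theorem foldl_max_le (g : Nat → Int) :
    ∀ (l : List Nat) (x y : Int), x ≤ y → (∀ j ∈ l, g j ≤ y) →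
      l.foldl (fun acc j => max acc (g j)) x ≤ y := by
  intro l
  induction l with
  | nil => intro x y hx _; exact hx
  | cons i t ih =>
    intro x y hx hub
    exact ih _ y (max_le hx (hub i List.mem_cons_self)) (fun j hj => hub j (List.mem_cons_of_mem _ hj))

-- A's loop evaluated: foldl of max over the candidates, capped by the full prefix sum
theorem loop_eq (gs : List Int) (K a b now best : Int) :
    solveLoop gs K a b now best =
      (List.range (mN K gs.length)).foldl
        (fun acc i => max acc (cand K a b now (psumAt gs (i + 1)) ((i : Int) + 1)))
        (max best (now + psumAt gs (mN K gs.length))) := by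
  induction gs generalizing K a b now best with
  | nil =>
    simp [solveLoop, mN, psumAt]
  | cons g t ih =>
    by_cases hK : K ≤ 0
    · have h0 : K.toNat = 0 := by omega
      simp [solveLoop, hK, mN, h0, psumAt]
    · have hKpos : 0 < K := by omega
      have hm : mN K (g :: t).length = mN (K - 1) t.length + 1 := by
        simp only [mN, List.length_cons]; omega
      set s := PySem.Int.floordiv g 2 with hs
      have hps : ∀ i : Nat, psumAt (g :: t) (i + 1) = s + psumAt t i := by
        intro i; simp [psumAt, List.take_succ_cons, hs]
      have hstep : solveLoop (g :: t) K a b now best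
          = solveLoop t (K - 1) (a + s) (b + s) (now + s)
              (max best ((now + s) + max (a + s) (b + s) + ((a + s) + (b + s)) * ((K - 1) - 1))) := by
        simp [solveLoop, hK, hs]
      rw [hstep, ih, hm, List.range_succ_eq_map, List.foldl_cons, List.foldl_map]
      apply foldl_max_ext
      · intro i _
        show cand (K - 1) (a + s) (b + s) (now + s) (psumAt t (i + 1)) ((i : Int) + 1)
            = cand K a b now (psumAt (g :: t) (i.succ + 1)) ((i.succ : Int) + 1)
        rw [show i.succ + 1 = (i + 1) + 1 from rfl, hps (i + 1)]
        simp only [cand]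
        rw [show max (a + s) (b + s) = max a b + s by rw [max_add_add_right]]
        push_cast
        ring
      · rw [hps (mN (K - 1) t.length), hps 0]
        have hc : cand K a b now (s + psumAt t 0) (((0 : Nat) : Int) + 1)
            = now + s + max (a + s) (b + s) + (a + s + (b + s)) * (K - 1 - 1) := by
          simp only [cand, psumAt, List.take_zero, List.map_nil, List.sum_nil]
          rw [show max (a + s) (b + s) = max a b + s by rw [max_add_add_right]]
          push_cast; ring
        rw [← hc, max_right_comm, add_assoc]

-- cand at (i+1) IS the candidate function GG (for now = 0)
theorem cand_eq_GG (gs : List Int) (a b K : Int) (j : Nat) :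
    cand K a b 0 (psumAt gs j) (j : Int) = GG gs a b K j := by
  simp only [cand, GG]; ring

-- the step identity: GG (j+1) - GG j = DD j - (a + b)
theorem GG_step (gs : List Int) (a b K : Int) (j : Nat) (hj : j < gs.length) :
    GG gs a b K (j + 1) = GG gs a b K j + (DD gs K j - (a + b)) := by
  simp only [GG, DD, psumAt_succ gs j hj, List.getD_eq_getElem?_getD,
    List.getElem?_eq_getElem hj, Option.getD_some]
  push_cast
  ring

-- concavity: the improvements DD are nonincreasing (halves descending & nonnegative)
theorem DD_mono (gs : List Int) (K : Int) (m j : Nat)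
    (hm : m ≤ gs.length) (hmK : (m : Int) ≤ max K 0)
    (hdesc : ∀ (i : Nat) (h : i + 1 < gs.length), gs[i + 1]'h ≤ gs[i]'(Nat.lt_of_succ_lt h))
    (hnn : ∀ (i : Nat) (h : i < gs.length), 0 ≤ gs[i]'h)
    (hj : j + 2 ≤ m) :
    DD gs K (j + 1) ≤ DD gs K j := by
  have hj1 : j + 1 < gs.length := by omega
  have hj0 : j < gs.length := by omega
  have hK2 : (0 : Int) ≤ K - j - 2 := by
    have : ((j : Int) + 2) ≤ (m : Int) := by exact_mod_cast hj
    omega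
  have hle : PySem.Int.floordiv gs[j + 1] 2 ≤ PySem.Int.floordiv gs[j] 2 := by
    rw [PySem.Int.floordiv_eq_ediv_of_pos (by omega), PySem.Int.floordiv_eq_ediv_of_pos (by omega)]
    exact Int.ediv_le_ediv (by omega) (hdesc j hj1)
  have h0nn : (0 : Int) ≤ PySem.Int.floordiv gs[j] 2 := by
    rw [PySem.Int.floordiv_eq_ediv_of_pos (by omega)]
    exact Int.ediv_nonneg (hnn j hj0) (by omega)
  have h1nn : (0 : Int) ≤ PySem.Int.floordiv gs[j + 1] 2 := by
    rw [PySem.Int.floordiv_eq_ediv_of_pos (by omega)]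
    exact Int.ediv_nonneg (hnn (j + 1) hj1) (by omega)
  simp only [DD, psumAt_succ gs j hj0, List.getD_eq_getElem?_getD,
    List.getElem?_eq_getElem hj1, List.getElem?_eq_getElem hj0, Option.getD_some]
  push_cast
  nlinarith [mul_le_mul_of_nonneg_right hle hK2, mul_nonneg h0nn hK2]

-- first-descent finds the maximum of the concave candidate sequence
theorem GG_max (gs : List Int) (a b K : Int) (m n : Nat)
    (hm : m ≤ gs.length) (hmK : (m : Int) ≤ max K 0)
    (hdesc : ∀ (i : Nat) (h : i + 1 < gs.length), gs[i + 1]'h ≤ gs[i]'(Nat.lt_of_succ_lt h))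
    (hnn : ∀ (i : Nat) (h : i < gs.length), 0 ≤ gs[i]'h)
    (hn : n ≤ m)
    (hinc : ∀ j, j < n → a + b < DD gs K j)
    (hstop : n = m ∨ DD gs K n ≤ a + b) :
    ∀ j, j ≤ m → GG gs a b K j ≤ GG gs a b K n := by
  have up : ∀ j2, j2 ≤ n → ∀ j1, j1 ≤ j2 → GG gs a b K j1 ≤ GG gs a b K j2 := by
    intro j2
    induction j2 with
    | zero => intro _ j1 h1; interval_cases j1; exact le_refl _
    | succ j ih =>
      intro hle j1 h1
      rcases Nat.lt_succ_iff_lt_or_eq.mp (Nat.lt_succ_of_le h1) with h | rfl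
      · have hstep : GG gs a b K j ≤ GG gs a b K (j + 1) := by
          rw [GG_step gs a b K j (by omega)]
          have := hinc j (by omega)
          omega
        exact le_trans (ih (by omega) j1 (by omega)) hstep
      · exact le_refl _
  have dchain : ∀ j, n ≤ j → j + 1 ≤ m → DD gs K j ≤ a + b := by
    intro j hnj
    induction j with
    | zero =>
      intro hjm
      have : n = 0 := by omega
      rcases hstop with h | h
      · omega
      · rw [this] at h; exact h
    | succ j ih =>
      intro hjm
      rcases Nat.lt_succ_iff_lt_or_eq.mp (Nat.lt_succ_of_le hnj) with h | rfl
      · exact le_trans (DD_mono gs K m j hm hmK hdesc hnn (by omega)) (ih (by omega) (by omega))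
      · rcases hstop with h | h
        · omega
        · exact h
  have down : ∀ j, n ≤ j → j ≤ m → GG gs a b K j ≤ GG gs a b K n := by
    intro j hnj
    induction j with
    | zero =>
      intro _
      have : n = 0 := by omega
      rw [this]
    | succ j ih =>
      intro hjm
      rcases Nat.lt_succ_iff_lt_or_eq.mp (Nat.lt_succ_of_le hnj) with h | rfl
      · have hstep : GG gs a b K (j + 1) ≤ GG gs a b K j := by
          rw [GG_step gs a b K j (by omega)]
          have := dchain j (by omega) (by omega)
          omega
        exact le_trans hstep (ih (by omega) (by omega))
      · exact le_refl _
  intro j hj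
  rcases Nat.lt_or_ge n j with h | h
  · exact down j (by omega) hj
  · exact up n (le_refl n) j h

-- scanB characterised: it stops at the first index whose test fails
theorem scanB_go (c K : Int) (hs : List Int) :
    ∀ (t : List Int) (k : Nat), hs.drop k = t → k ≤ hs.length →
    ∃ n : Nat, k ≤ n ∧ n ≤ hs.length ∧
      scanB t c K (k : Int) ((hs.take k).sum) = ((n : Int), (hs.take n).sum, hs.drop n) ∧
      (∀ j, k ≤ j → j < n →
        c < 2 * (hs.getD j 0 * (K - (j : Int) - 1) - (hs.take j).sum)) ∧
      (n = hs.length ∨ 2 * (hs.getD n 0 * (K - (n : Int) - 1) - (hs.take n).sum) ≤ c) := by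
  intro t
  induction t with
  | nil =>
    intro k hdrop hk
    have hkl : k = hs.length := by
      have := congrArg List.length hdrop
      simp at this
      omega
    exact ⟨k, le_refl k, by omega, by simp [scanB, hdrop], fun j h1 h2 => by omega, Or.inl hkl⟩
  | cons h t ih =>
    intro k hdrop hk
    have hklt : k < hs.length := by
      have := congrArg List.length hdrop
      simp at this
      omega
    have hgetk : hs[k] = h := by
      have h0 : (hs.drop k)[0]? = some h := by rw [hdrop]; rfl
      rw [List.getElem?_drop] at h0
      simpa [List.getElem?_eq_getElem hklt] using h0
    by_cases hc : 2 * (h * (K - (k : Int) - 1) - (hs.take k).sum) > c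
    · have hc' : ¬ (2 * (h * (K - (k : Int) - 1) - (hs.take k).sum) ≤ c) := not_le.mpr hc
      have hdrop' : hs.drop (k + 1) = t := by
        have : hs.drop (k + 1) = (hs.drop k).tail := by rw [List.tail_drop]
        rw [this, hdrop]; rfl
      have htake' : (hs.take (k + 1)).sum = (hs.take k).sum + h := by
        rw [List.take_succ, List.getElem?_eq_getElem hklt]
        simp [hgetk]
      obtain ⟨n, hn1, hn2, hn3, hn4, hn5⟩ := ih (k + 1) hdrop' (by omega)
      refine ⟨n, by omega, hn2, ?_, ?_, hn5⟩
      · rw [show scanB (h :: t) c K (k : Int) ((hs.take k).sum)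
            = scanB t c K ((k : Int) + 1) ((hs.take k).sum + h) by simp [scanB, hc']]
        rw [← htake', show ((k : Int) + 1) = ((k + 1 : Nat) : Int) by push_cast; ring]
        exact hn3
      · intro j hj1 hj2
        rcases Nat.lt_or_ge j (k + 1) with hlt | hge
        · have : j = k := by omega
          subst this
          simpa [List.getD_eq_getElem?_getD, List.getElem?_eq_getElem hklt, hgetk] using hc
        · exact hn4 j hge hj2
    · have hc' : 2 * (h * (K - (k : Int) - 1) - (hs.take k).sum) ≤ c := not_lt.mp hc
      refine ⟨k, le_refl k, by omega, ?_, fun j h1 h2 => by omega, Or.inr ?_⟩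
      · simp [scanB, hc', hdrop]
      · simpa [List.getD_eq_getElem?_getD, List.getElem?_eq_getElem hklt, hgetk] using hc'

-- descending sort commutes with a monotone map (uniqueness of the sorted value list)
theorem sorted_rev_map_mono (f : Int → Int) (hf : ∀ x y : Int, x ≤ y → f x ≤ f y)
    (l : List Int) :
    PySem.List.sorted (l.map f) (fun x => x) true
      = (PySem.List.sorted l (fun x => x) true).map f := by
  refine List.Perm.eq_of_pairwise (le := fun a b : Int => b ≤ a) ?_ ?_ ?_ ?_
  · intro a b _ _ h1 h2
    exact le_antisymm h2 h1
  · exact PySem.List.sorted_pairwise_rev (l.map f) (fun x => x)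
  · exact List.Pairwise.map f (fun {x y} h => hf y x h)
      (PySem.List.sorted_pairwise_rev l (fun x => x))
  · exact (PySem.List.sorted_perm _ _ _).trans ((PySem.List.sorted_perm l _ _).map f).symm

-- the main equivalence, assuming the precondition
theorem solve_eq_alt (N K L : Int) (A : List Int) (hA : A ≠ [])
    (hN : N ≤ (A.length : Int)) : solve N K L A = solve_alt N K L A := by
  simp only [solve, solve_alt]
  set As := PySem.List.sorted A (fun x => x) false with hAs
  have hAslen : As.length = A.length := PySem.List.length_sorted A _ _
  have hAssorted : As.Pairwise (fun x y : Int => x ≤ y) :=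
    PySem.List.sorted_pairwise A (fun x => x)
  set gaps := (PySem.List.pyRange 0 (N - 1) 1).map
    (fun i => PySem.List.pyGetD As (i + 1) 0 - PySem.List.pyGetD As i 0) with hgaps
  -- every gap is nonnegative (As is sorted ascending, indices in range under Pre_)
  have hgapnn : ∀ g ∈ gaps, 0 ≤ g := by
    intro g hg
    rw [hgaps] at hg
    obtain ⟨i, hi, rfl⟩ := List.mem_map.mp hg
    obtain ⟨hi0, hi1⟩ := (PySem.List.mem_pyRange_one).mp hi
    have h1lt : i + 1 < (As.length : Int) := by omega
    have h0lt : i < (As.length : Int) := by omega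
    rw [PySem.List.pyGetD_eq_getElem As (i := i + 1) 0 (by omega) h1lt,
        PySem.List.pyGetD_eq_getElem As (i := i) 0 (by omega) h0lt]
    have hlt : i.toNat < (i + 1).toNat := by omega
    have := (List.pairwise_iff_getElem.mp hAssorted) i.toNat (i + 1).toNat
      (by omega) (by omega) hlt
    omega
  set gs := PySem.List.sorted gaps (fun x => x) true with hgs
  have hgslen : gs.length = gaps.length := PySem.List.length_sorted gaps _ _
  have hgsnn : ∀ (i : Nat) (h : i < gs.length), 0 ≤ gs[i]'h := by
    intro i h
    have hx : gs[i] ∈ gs := List.getElem_mem h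
    exact hgapnn _ (((PySem.List.mem_sorted gaps (fun x => x) true) _).mp hx)
  have hgsdesc : ∀ (i : Nat) (h : i + 1 < gs.length), gs[i + 1]'h ≤ gs[i]'(Nat.lt_of_succ_lt h) := by
    intro i h
    have hp : List.Pairwise (fun a b : Int => b ≤ a) gs :=
      PySem.List.sorted_pairwise_rev gaps (fun x => x)
    exact List.pairwise_iff_getElem.mp hp i (i + 1) (by omega) h (by omega)
  -- B's halves list is the mapped descending gap list
  have hhalves : PySem.List.sorted ((PySem.List.pyRange 0 (N - 1) 1).map
      (fun i => PySem.Int.floordiv (PySem.List.pyGetD As (i + 1) 0 - PySem.List.pyGetD As i 0) 2))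
      (fun x => x) true = gs.map (fun g => PySem.Int.floordiv g 2) := by
    have hmono : ∀ x y : Int, x ≤ y → PySem.Int.floordiv x 2 ≤ PySem.Int.floordiv y 2 := by
      intro x y h
      rw [PySem.Int.floordiv_eq_ediv_of_pos (by omega),
          PySem.Int.floordiv_eq_ediv_of_pos (by omega)]
      exact Int.ediv_le_ediv (by omega) h
    have : (PySem.List.pyRange 0 (N - 1) 1).map
        (fun i => PySem.Int.floordiv (PySem.List.pyGetD As (i + 1) 0 - PySem.List.pyGetD As i 0) 2)
        = gaps.map (fun g => PySem.Int.floordiv g 2) := by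
      rw [hgaps, List.map_map]; rfl
    rw [this, sorted_rev_map_mono _ hmono, hgs]
  rw [hhalves]
  set a := PySem.List.pyGetD As 0 0 with ha
  set b := L - PySem.List.pyGetD As (-1) 0 with hb
  set m := mN K gs.length with hm
  have hgapslen : gaps.length = (N - 1).toNat := by
    rw [hgaps, List.length_map, PySem.List.length_pyRange_one]
    congr 1
    omega
  -- the Int bound B computes slices exactly the first m halves
  have hmB : max 0 (min K (N - 1)) = (m : Int) := by
    rw [hm]; unfold mN; rw [hgslen, hgapslen]; omega
  rw [hmB]
  set hsm := PySem.List.slice (gs.map (fun g => PySem.Int.floordiv g 2)) none (some (m : Int))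
    with hhsm
  have hsm_take : hsm = (gs.map (fun g => PySem.Int.floordiv g 2)).take m := by
    rw [hhsm, PySem.List.slice_to_natCast]
  have hmlen : m ≤ gs.length := by rw [hm]; exact min_le_right _ _
  have hsmlen : hsm.length = m := by
    rw [hsm_take, List.length_take, List.length_map]; omega
  -- prefix sums of hsm ARE psumAt gs
  have hPB : ∀ j, j ≤ m → (hsm.take j).sum = psumAt gs j := by
    intro j hj
    rw [hsm_take, List.take_take, min_eq_left hj, ← List.map_take]
    rfl
  have hget : ∀ (j : Nat) (hj : j < m), hsm.getD j 0 = PySem.Int.floordiv (gs[j]'(by omega)) 2 := by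
    intro j hj
    have hjl : j < hsm.length := by omega
    simp only [List.getD_eq_getElem?_getD, List.getElem?_eq_getElem hjl, Option.getD_some]
    simp [hsm_take]
  -- run B's scan
  obtain ⟨n, hn0, hnle, hscan, hinc, hstop⟩ :=
    scanB_go (a + b) K hsm hsm 0 (by simp) (by omega)
  rw [hsmlen] at hnle hstop
  simp only [List.take_zero, List.sum_nil, Nat.cast_zero] at hscan
  rw [hscan]
  -- B's value: max (GG n) (psumAt gs m)
  have hsum : (hsm.take n).sum + (hsm.drop n).sum = psumAt gs m := by
    rw [← List.sum_append, List.take_append_drop, ← hPB m (le_refl m),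
      List.take_of_length_le (by omega)]
  have hBval : max (max a b + (a + b) * (K - (n : Int) - 1) + 2 * (hsm.take n).sum * (K - (n : Int)))
      ((hsm.take n).sum + (hsm.drop n).sum) = max (GG gs a b K n) (psumAt gs m) := by
    rw [hsum, hPB n hnle, GG]
  -- A's side: loop_eq then evaluate the fold at the maximum GG n
  rw [loop_eq, ← hm]
  have hmK : (m : Int) ≤ max K 0 := by rw [hm]; unfold mN; omega
  have hDD : ∀ j, j < m →
      2 * (hsm.getD j 0 * (K - (j : Int) - 1) - (hsm.take j).sum) = DD gs K j := by
    intro j hj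
    rw [hget j hj, hPB j (by omega), DD]
    simp only [List.getD_eq_getElem?_getD,
      List.getElem?_eq_getElem (by omega : j < gs.length), Option.getD_some]
  have hinc' : ∀ j, j < n → a + b < DD gs K j := by
    intro j hj
    rw [← hDD j (by omega)]
    exact hinc j (by omega) hj
  have hstop' : n = m ∨ DD gs K n ≤ a + b := by
    rcases hstop with h | h
    · exact Or.inl h
    · rcases Nat.lt_or_ge n m with hlt | hge
      · exact Or.inr (by rw [← hDD n hlt]; exact h)
      · exact Or.inl (by omega)
  have hub : ∀ j, j ≤ m → GG gs a b K j ≤ GG gs a b K n :=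
    GG_max gs a b K m n hmlen hmK hgsdesc hgsnn hnle hinc' hstop'
  have hinit : max a b + (a + b) * (K - 1) = GG gs a b K 0 := by
    simp [GG, psumAt]
  have hfold : (List.range m).foldl
      (fun acc i => max acc (cand K a b 0 (psumAt gs (i + 1)) ((i : Int) + 1)))
      (max (max a b + (a + b) * (K - 1)) (0 + psumAt gs m)) = max (psumAt gs m) (GG gs a b K n) := by
    rw [zero_add, hinit, foldl_max_init]
    congr 1
    have hcand : ∀ i ∈ List.range m,
        cand K a b 0 (psumAt gs (i + 1)) ((i : Int) + 1) = GG gs a b K (i + 1) := by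
      intro i _
      rw [show ((i : Int) + 1) = ((i + 1 : Nat) : Int) by push_cast; ring, cand_eq_GG]
    apply le_antisymm
    · apply foldl_max_le
      · exact hub 0 (Nat.zero_le m)
      · intro j hj
        rw [hcand j hj]
        exact hub (j + 1) (by simpa using List.mem_range.mp hj)
    · rcases Nat.eq_zero_or_pos n with rfl | hpos
      · exact foldl_max_ge_init _ _ _
      · have hmem : n - 1 ∈ List.range m := List.mem_range.mpr (by omega)
        have hge := foldl_max_ge_mem (fun i => cand K a b 0 (psumAt gs (i + 1)) ((i : Int) + 1))
          (List.range m) (GG gs a b K 0) (n - 1) hmem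
        simp only at hge
        rw [hcand (n - 1) hmem, show n - 1 + 1 = n by omega] at hge
        exact hge
  rw [hfold, hBval, max_comm]

-- ===== VERDICT (by name: the statement is the Claim_ definition above) =====
theorem solve_spec : Claim_equal_solve := by
  intro N K L A _ hPre
  unfold Spec_solve
  exact solve_eq_alt N K L A hPre.1 hPre.2
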